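-- pv_equiv track=rewrite | github.com/carlos1270/compilador_alpha | src/analise_semantica.py | parametros_funcao
-- ===== SOURCE A (Python) =====
-- def parametros_funcao(nome_funcao, i_token, lista):
--     parametros = []
--     i = i_token
--     while (lista[i][0] != nome_funcao):
--         if (lista[i][0] != ',' and lista[i][0] != '(' and lista[i][0] != ')'):
--             parametros.append(lista[i][0])
--         i -= 1
--     parametros = list(reversed(parametros))
--     return parametros
-- ===== SOURCE B (Python) =====
-- def parametros_funcao(nome_funcao, i_token, lista):
--     # Locate the function-name token scanning backward, then collect the
--     # parameters with one forward filter pass; no reversal needed.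
--     i = i_token
--     while lista[i][0] != nome_funcao:
--         i -= 1
--     return [lista[j][0] for j in range(i + 1, i_token + 1)
--             if lista[j][0] not in (',', '(', ')')]
-- ===== Notes on version B (the rewrite author's own statement) =====
-- stated objective: alternative
-- what changed: A collects tokens while scanning backward and reverses at the end; B first locates the function-name token with a bare backward scan, then builds the result with one forward filter pass over the indices between it and i_token, so no accumulation during the search and no reversal.
import Mathlib
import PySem

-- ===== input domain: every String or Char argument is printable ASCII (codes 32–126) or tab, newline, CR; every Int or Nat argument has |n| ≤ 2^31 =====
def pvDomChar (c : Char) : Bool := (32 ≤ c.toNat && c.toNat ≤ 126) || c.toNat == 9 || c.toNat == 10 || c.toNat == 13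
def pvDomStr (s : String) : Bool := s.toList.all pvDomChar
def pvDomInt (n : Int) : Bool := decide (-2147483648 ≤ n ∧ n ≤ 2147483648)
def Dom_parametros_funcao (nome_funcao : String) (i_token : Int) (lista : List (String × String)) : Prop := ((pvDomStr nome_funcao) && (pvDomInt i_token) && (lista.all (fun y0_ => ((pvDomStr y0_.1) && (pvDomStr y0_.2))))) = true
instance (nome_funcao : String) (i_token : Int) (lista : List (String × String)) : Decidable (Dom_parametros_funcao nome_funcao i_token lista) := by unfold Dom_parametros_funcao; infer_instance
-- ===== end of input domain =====

-- B replaces A's backward collect-and-reverse loop by a locate-then-forward-filter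
-- decomposition (same cost, no reversal); equivalence is about the return value only.

-- ===== PORT A =====
-- the Python while loop, fuel = number of remaining decrements before an IndexError is certain;
-- the `none` branch is Python's IndexError (excluded by Pre_), the value there is irrelevant
def pvGoA (nome : String) (lista : List (String × String)) : Nat → Int → List String → List String
  | 0, _, acc => acc.reverse
  | fuel + 1, i, acc =>
    match PySem.List.pyGet? lista i with
    | none => acc.reverse
    | some p =>
      if p.1 ≠ nome then
        pvGoA nome lista fuel (i - 1)
          (if p.1 ≠ "," ∧ p.1 ≠ "(" ∧ p.1 ≠ ")" then acc ++ [p.1] else acc)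
      else acc.reverse

def parametros_funcao (nome_funcao : String) (i_token : Int) (lista : List (String × String)) : List String :=
  pvGoA nome_funcao lista (i_token + (lista.length : Int) + 2).toNat i_token []

-- ===== PORT B =====
-- locate loop of Source B (none = the loop's IndexError, excluded by Pre_)
def pvFindStop (nome : String) (lista : List (String × String)) : Nat → Int → Option Int
  | 0, _ => none
  | fuel + 1, i =>
    match PySem.List.pyGet? lista i with
    | none => none
    | some p => if p.1 = nome then some i else pvFindStop nome lista fuel (i - 1)

def parametros_funcao_alt (nome_funcao : String) (i_token : Int) (lista : List (String × String)) : List String :=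
  match pvFindStop nome_funcao lista (i_token + (lista.length : Int) + 2).toNat i_token with
  | none => []
  | some stop =>
    (PySem.List.pyRange (stop + 1) (i_token + 1) 1).filterMap (fun j =>
      match PySem.List.pyGet? lista j with
      | none => none
      | some p => if p.1 ≠ "," ∧ p.1 ≠ "(" ∧ p.1 ≠ ")" then some p.1 else none)

-- ===== PRECONDITION & SPEC =====
-- A raises IndexError iff i_token is outside the wrap range [-len, len) or the backward scan
-- (with one negative-index wraparound) runs past index -len without meeting nome_funcao;
-- Pre_ is exactly the complement: i_token in range and some index k ≤ i_token, k ≥ -len names the function.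
def Pre_parametros_funcao (nome_funcao : String) (i_token : Int) (lista : List (String × String)) : Prop :=
  -(lista.length : Int) ≤ i_token ∧ i_token < (lista.length : Int) ∧
  ((PySem.List.pyRange (-(lista.length : Int)) (i_token + 1) 1).any
    (fun k => (PySem.List.pyGet? lista k).map Prod.fst == some nome_funcao)) = true
instance (nome_funcao : String) (i_token : Int) (lista : List (String × String)) : Decidable (Pre_parametros_funcao nome_funcao i_token lista) := by unfold Pre_parametros_funcao; infer_instance

def pvWitness_parametros_funcao : String × Int × (List (String × String)) :=
  ("f", 3, [("f", "id"), ("(", "sym"), ("x", "id"), (")", "sym")])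

def Spec_parametros_funcao (nome_funcao : String) (i_token : Int) (lista : List (String × String)) (out : List String) : Prop := out = parametros_funcao_alt nome_funcao i_token lista
instance (nome_funcao : String) (i_token : Int) (lista : List (String × String)) (out : List String) : Decidable (Spec_parametros_funcao nome_funcao i_token lista out) := by unfold Spec_parametros_funcao; infer_instance

-- ===== CLAIM (what is proved, stated in full; the proofs are below) =====
def Claim_equal_parametros_funcao : Prop := ∀ (nome_funcao : String) (i_token : Int) (lista : List (String × String)), Dom_parametros_funcao nome_funcao i_token lista → Pre_parametros_funcao nome_funcao i_token lista → Spec_parametros_funcao nome_funcao i_token lista (parametros_funcao nome_funcao i_token lista)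

-- ===== LEMMAS AND PROOFS =====

theorem pvFindStop_le (nome : String) (lista : List (String × String)) :
    ∀ (fuel : Nat) (i stop : Int), pvFindStop nome lista fuel i = some stop → stop ≤ i := by
  intro fuel
  induction fuel with
  | zero => intro i stop h; simp [pvFindStop] at h
  | succ f ih =>
    intro i stop h
    unfold pvFindStop at h
    cases hg : PySem.List.pyGet? lista i with
    | none => rw [hg] at h; exact absurd h (by simp)
    | some p =>
      rw [hg] at h
      by_cases hn : p.1 = nome
      · simp [hn] at h; omega
      · simp [hn] at h
        have := ih (i - 1) stop h
        omega

theorem pvGoA_eq_fwd (nome : String) (lista : List (String × String)) :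
    ∀ (fuel : Nat) (i stop : Int) (acc : List String),
      pvFindStop nome lista fuel i = some stop →
      pvGoA nome lista fuel i acc =
        ((PySem.List.pyRange (stop + 1) (i + 1) 1).filterMap (fun j =>
          match PySem.List.pyGet? lista j with
          | none => none
          | some p => if p.1 ≠ "," ∧ p.1 ≠ "(" ∧ p.1 ≠ ")" then some p.1 else none)) ++ acc.reverse := by
  intro fuel
  induction fuel with
  | zero => intro i stop acc h; simp [pvFindStop] at h
  | succ f ih =>
    intro i stop acc h
    unfold pvFindStop at h
    unfold pvGoA
    cases hg : PySem.List.pyGet? lista i with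
    | none => rw [hg] at h; exact absurd h (by simp)
    | some p =>
      rw [hg] at h
      by_cases hn : p.1 = nome
      · simp only [hn, reduceIte] at h
        have hstop : stop = i := by
          have := Option.some.inj h; omega
        subst hstop
        simp [hn, PySem.List.pyRange_one_eq_nil (by omega : i + 1 ≤ i + 1)]
      · simp only [hn] at h
        have hle : stop ≤ i - 1 := pvFindStop_le nome lista f (i - 1) stop h
        rw [if_neg (by simp [hn])] at *
        simp only [if_pos hn]
        rw [ih (i - 1) stop _ h]
        rw [PySem.List.pyRange_one_succ_right (by omega : stop + 1 ≤ i)]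
        rw [List.filterMap_append]
        simp only [List.filterMap_cons, List.filterMap_nil, hg]
        by_cases hk : p.1 ≠ "," ∧ p.1 ≠ "(" ∧ p.1 ≠ ")"
        · simp [hk, List.append_assoc]
        · simp [hk]

theorem pvFindStop_total (nome : String) (lista : List (String × String)) :
    ∀ (fuel : Nat) (i : Int),
      (i + (lista.length : Int) + 2).toNat ≤ fuel →
      -(lista.length : Int) ≤ i → i < (lista.length : Int) →
      (∃ k, -(lista.length : Int) ≤ k ∧ k ≤ i ∧
        (PySem.List.pyGet? lista k).map Prod.fst = some nome) →
      ∃ stop, pvFindStop nome lista fuel i = some stop := by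
  intro fuel
  induction fuel with
  | zero => intro i hf h1 h2 _; omega
  | succ f ih =>
    intro i hf h1 h2 hex
    unfold pvFindStop
    cases hg : PySem.List.pyGet? lista i with
    | none =>
      rw [PySem.List.pyGet?_eq_none_iff] at hg
      unfold PySem.Raise.InRange at hg
      omega
    | some p =>
      by_cases hn : p.1 = nome
      · exact ⟨i, by simp [hn]⟩
      · simp only [if_neg hn]
        obtain ⟨k, hk1, hk2, hk3⟩ := hex
        have hki : k ≠ i := by
          intro he; subst he
          rw [hg] at hk3
          simp at hk3
          exact hn hk3
        exact ih (i - 1) (by omega) (by omega) (by omega) ⟨k, hk1, by omega, hk3⟩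

-- ===== VERDICT (by name: the statement is the Claim_ definition above) =====
theorem parametros_funcao_spec : Claim_equal_parametros_funcao := by
  intro nome i_token lista _ hpre
  obtain ⟨h1, h2, h3⟩ := hpre
  rw [List.any_eq_true] at h3
  obtain ⟨k, hk, hkp⟩ := h3
  rw [PySem.List.mem_pyRange_one] at hk
  obtain ⟨stop, hstop⟩ := pvFindStop_total nome lista
    (i_token + (lista.length : Int) + 2).toNat i_token (le_refl _) h1 h2
    ⟨k, hk.1, by omega, by simpa using hkp⟩
  unfold Spec_parametros_funcao parametros_funcao parametros_funcao_alt
  rw [hstop, pvGoA_eq_fwd nome lista _ i_token stop [] hstop]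
  simp
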